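-- pv_equiv track=rewrite | github.com/pratikreddy9/switchboard | switchboard/collectors.py | _candidate_match_paths
-- ===== SOURCE A (Python) =====
-- def _candidate_match_paths(name: str, full_path: str) -> list[str]:
--     normalized_full = str(full_path).replace("\\", "/").lstrip("/")
--     basename = str(name).replace("\\", "/")
--     candidates = [normalized_full, basename]
--     parts = [part for part in normalized_full.split("/") if part]
--     for index in range(len(parts)):
--         candidates.append("/".join(parts[index:]))
--     deduped: list[str] = []
--     seen: set[str] = set()
--     for candidate in candidates:
--         if candidate and candidate not in seen:
--             seen.add(candidate)
--             deduped.append(candidate)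
--     return deduped
-- ===== SOURCE B (Python) =====
-- def _candidate_match_paths(name: str, full_path: str) -> list[str]:
--     normalized_full = str(full_path).replace("\\", "/").lstrip("/")
--     basename = str(name).replace("\\", "/")
--     candidates = [normalized_full, basename]
--     parts = [part for part in normalized_full.split("/") if part]
--     # build suffixes right-to-left with an accumulator (no repeated slice+join)
--     tails = []
--     acc = None
--     for part in reversed(parts):
--         acc = part if acc is None else part + "/" + acc
--         tails.append(acc)
--     candidates.extend(reversed(tails))
--     deduped: list[str] = []
--     seen: set[str] = set()
--     for candidate in candidates:
--         if candidate and candidate not in seen: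
--             seen.add(candidate)
--             deduped.append(candidate)
--     return deduped
-- ===== Notes on version B (the rewrite author's own statement) =====
-- stated objective: alternative
-- what changed: The per-index slice-and-join loop (re-joining each suffix from scratch) is replaced by a single right-to-left pass that extends one accumulator string per part, emitting the suffixes and re-ordering them once; the initial candidates and the dedup pass are unchanged.
import Mathlib
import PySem

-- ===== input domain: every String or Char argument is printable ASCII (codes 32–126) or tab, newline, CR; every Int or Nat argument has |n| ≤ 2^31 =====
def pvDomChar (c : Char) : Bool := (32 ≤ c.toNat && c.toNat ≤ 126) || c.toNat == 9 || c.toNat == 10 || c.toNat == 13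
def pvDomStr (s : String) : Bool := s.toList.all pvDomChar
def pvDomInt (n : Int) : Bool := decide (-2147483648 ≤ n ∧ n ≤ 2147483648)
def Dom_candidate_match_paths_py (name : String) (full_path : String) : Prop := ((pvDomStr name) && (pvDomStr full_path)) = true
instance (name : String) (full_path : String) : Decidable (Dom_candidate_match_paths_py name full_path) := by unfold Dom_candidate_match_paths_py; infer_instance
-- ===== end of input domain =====

-- B replaces the per-index slice-and-join suffix loop by one right-to-left accumulator pass; initial candidates and dedup unchanged.


-- shared by both ports: the final dedup loop (identical line-for-line in A and B)
def pvDedup (candidates : List (List Char)) : List (List Char) :=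
  (candidates.foldl
    (fun (st : List (List Char) × PySem.Set (List Char)) c =>
      if !c.isEmpty && !(PySem.Set.contains st.2 c) then (st.1 ++ [c], PySem.Set.add st.2 c) else st)
    ([], PySem.Set.empty)).1

-- ===== PORT A =====
-- suffix loop of A: for index in range(len(parts)): candidates.append("/".join(parts[index:]))
def pvSuffixLoopA (parts : List (List Char)) (candidates : List (List Char)) : List (List Char) :=
  (PySem.List.pyRange 0 (PySem.List.len parts) 1).foldl
    (fun cs idx => cs ++ [PySem.Chars.join ['/'] (PySem.List.slice parts (some idx) none)]) candidates

-- strings ported on the List Char side; .lstrip("/") is ported by hand as dropWhile (· == '/'),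
-- exact because the strip set is the single character '/'
def candidate_match_paths_py (name : String) (full_path : String) : List String :=
  let normalized_full : List Char := (PySem.Chars.replace full_path.toList ['\\'] ['/']).dropWhile (· == '/')
  let basename : List Char := PySem.Chars.replace name.toList ['\\'] ['/']
  let candidates : List (List Char) := [normalized_full, basename]
  let parts : List (List Char) := (PySem.Chars.splitOn normalized_full ['/']).filter (fun p => !p.isEmpty)
  (pvDedup (pvSuffixLoopA parts candidates)).map String.ofList

-- ===== PORT B =====
-- loop body of B: acc = part if acc is None else part + "/" + acc; tails.append(acc)
def pvStepB (st : Option (List Char) × List (List Char)) (part : List Char) :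
    Option (List Char) × List (List Char) :=
  let acc := match st.1 with
    | none => part
    | some a => part ++ '/' :: a
  (some acc, st.2 ++ [acc])

-- B's suffix build: one right-to-left pass over parts, then the tails re-emitted in reverse
def pvTailsB (parts : List (List Char)) : Option (List Char) × List (List Char) :=
  parts.reverse.foldl pvStepB (none, [])

def candidate_match_paths_py_alt (name : String) (full_path : String) : List String :=
  let normalized_full : List Char := (PySem.Chars.replace full_path.toList ['\\'] ['/']).dropWhile (· == '/')
  let basename : List Char := PySem.Chars.replace name.toList ['\\'] ['/']
  let candidates : List (List Char) := [normalized_full, basename]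
  let parts : List (List Char) := (PySem.Chars.splitOn normalized_full ['/']).filter (fun p => !p.isEmpty)
  (pvDedup (candidates ++ (pvTailsB parts).2.reverse)).map String.ofList

-- ===== PRECONDITION & SPEC =====
def Spec_candidate_match_paths_py (name : String) (full_path : String) (out : List String) : Prop := out = candidate_match_paths_py_alt name full_path
instance (name : String) (full_path : String) (out : List String) : Decidable (Spec_candidate_match_paths_py name full_path out) := by unfold Spec_candidate_match_paths_py; infer_instance

-- ===== CLAIM (what is proved, stated in full; the proofs are below) =====
def Claim_equal_candidate_match_paths_py : Prop := ∀ (name : String) (full_path : String), Dom_candidate_match_paths_py name full_path → Spec_candidate_match_paths_py name full_path (candidate_match_paths_py name full_path)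

-- ===== LEMMAS AND PROOFS =====

-- B's accumulator state after consuming ps right-to-left: the accumulator holds "/".join(ps)
-- (none when ps is empty) and the tails list holds every suffix join, longest last.
theorem pvTailsB_spec (ps : List (List Char)) :
    pvTailsB ps =
      ((if ps.isEmpty then none else some (PySem.Chars.join ['/'] ps)),
       ((List.range ps.length).map (fun k => PySem.Chars.join ['/'] (ps.drop k))).reverse) := by
  induction ps with
  | nil => rfl
  | cons p ps ih =>
    have h : pvTailsB (p :: ps) = pvStepB (pvTailsB ps) p := by
      simp [pvTailsB, List.foldl_append]
    rw [h, ih]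
    cases ps with
    | nil => simp [pvStepB, PySem.Chars.join_singleton]
    | cons q qs =>
      simp only [pvStepB, List.isEmpty_cons, Bool.false_eq_true, if_false]
      have hj : PySem.Chars.join ['/'] (p :: q :: qs) = p ++ '/' :: PySem.Chars.join ['/'] (q :: qs) := by
        rw [PySem.Chars.join_cons_cons]; simp
      rw [show (p :: q :: qs).length = (q :: qs).length + 1 from rfl, List.range_succ_eq_map]
      simp [hj]

-- A's index loop over range(len(parts)) produces exactly those suffix joins in ascending order
theorem pvSuffixLoopA_eq (ps init : List (List Char)) :
    pvSuffixLoopA ps init = init ++ (pvTailsB ps).2.reverse := by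
  rw [pvTailsB_spec]
  simp only [List.reverse_reverse]
  unfold pvSuffixLoopA
  rw [PySem.List.foldl_append_singleton_eq_map]
  congr 1
  simp only [PySem.List.len_eq, PySem.List.pyRange_one, List.map_map]
  apply List.map_congr_left
  intro k hk
  simp only [List.mem_range] at hk
  simp [Function.comp, PySem.List.slice_from_natCast]

-- ===== VERDICT (by name: the statement is the Claim_ definition above) =====
theorem candidate_match_paths_py_spec : Claim_equal_candidate_match_paths_py := by
  intro name full_path _
  unfold Spec_candidate_match_paths_py candidate_match_paths_py candidate_match_paths_py_alt
  simp only [pvSuffixLoopA_eq]
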